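-- pv_equiv track=rewrite | github.com/FlochForster404/spamton-bot | spamton_bot.py | to_twitter_text
-- ===== SOURCE A (Python) =====
-- CA_ADDRESS = "H4gU4QfQ7kgfAjEJz1X9UjHJzdwc7h6t7LaGgrXYpump"  # keep EXACT
--
-- def to_twitter_text(msg: str) -> str:
--     # remove [] but keep CA intact
--     parts = []
--     for tok in msg.split():
--         if tok == CA_ADDRESS:
--             parts.append(tok)
--         else:
--             parts.append(tok.replace("[", "").replace("]", ""))
--     text = " ".join(parts)
--     return text[:277] + "..." if len(text) > 280 else text
-- ===== SOURCE B (Python) =====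
-- CA_ADDRESS = "H4gU4QfQ7kgfAjEJz1X9UjHJzdwc7h6t7LaGgrXYpump"  # keep EXACT
--
--
-- def to_twitter_text(msg: str) -> str:
--     # CA_ADDRESS contains no square brackets, so the per-token CA guard of the
--     # original is a no-op: normalise whitespace once, then drop every bracket
--     # character from the whole string in a single character-level pass.
--     text = "".join(ch for ch in " ".join(msg.split()) if ch not in "[]")
--     return text[:277] + "..." if len(text) > 280 else text
-- ===== Notes on version B (the rewrite author's own statement) =====
-- stated objective: simpler
-- what changed: Replaces the per-token loop with its CA special-case and two str.replace calls per token by one whole-string character filter after whitespace normalisation (the CA branch is a no-op since CA_ADDRESS contains no brackets).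
import Mathlib
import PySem

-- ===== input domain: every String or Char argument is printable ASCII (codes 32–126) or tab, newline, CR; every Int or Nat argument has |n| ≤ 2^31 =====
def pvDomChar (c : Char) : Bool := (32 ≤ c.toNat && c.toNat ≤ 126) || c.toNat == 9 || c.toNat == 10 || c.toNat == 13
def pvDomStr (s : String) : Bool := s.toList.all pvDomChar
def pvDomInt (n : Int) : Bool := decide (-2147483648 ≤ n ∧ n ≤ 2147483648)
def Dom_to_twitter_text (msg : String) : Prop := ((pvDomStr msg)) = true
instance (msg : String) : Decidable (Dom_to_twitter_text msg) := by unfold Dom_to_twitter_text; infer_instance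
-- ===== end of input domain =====

-- B drops A's per-token loop with its CA branch for one whole-string character filter (CA_ADDRESS contains no brackets): simpler, same output.

def pvCA : String := "H4gU4QfQ7kgfAjEJz1X9UjHJzdwc7h6t7LaGgrXYpump"

-- ===== PORT A =====
-- for tok in msg.split(): append tok unchanged if it is the CA, else tok.replace("[","").replace("]","")
def to_twitter_text (msg : String) : String :=
  let parts : List String :=
    (PySem.Str.split₀ msg).foldl
      (fun parts tok =>
        if tok == pvCA then parts ++ [tok]
        else parts ++ [PySem.Str.replace (PySem.Str.replace tok "[" "") "]" ""]) []
  let text := PySem.Str.join " " parts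
  if PySem.Str.len text > 280 then PySem.Str.slice text none (some 277) ++ "..." else text

-- ===== PORT B =====
-- "".join(ch for ch in " ".join(msg.split()) if ch not in "[]")  — a single character-level filter
def to_twitter_text_alt (msg : String) : String :=
  let text := String.ofList
    ((PySem.Str.join " " (PySem.Str.split₀ msg)).toList.filter
      (fun ch => !(ch == '[' || ch == ']')))
  if PySem.Str.len text > 280 then PySem.Str.slice text none (some 277) ++ "..." else text

-- ===== PRECONDITION & SPEC =====
def Spec_to_twitter_text (msg : String) (out : String) : Prop := out = to_twitter_text_alt msg
instance (msg : String) (out : String) : Decidable (Spec_to_twitter_text msg out) := by unfold Spec_to_twitter_text; infer_instance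

-- ===== CLAIM (what is proved, stated in full; the proofs are below) =====
def Claim_equal_to_twitter_text : Prop := ∀ (msg : String), Dom_to_twitter_text msg → Spec_to_twitter_text msg (to_twitter_text msg)

-- ===== LEMMAS AND PROOFS =====

-- python's tok.replace(c, "") with a single-character pattern deletes exactly the occurrences of c
theorem replace_go_single (c : Char) : ∀ (fuel : Nat) (l acc : List Char), l.length ≤ fuel →
    PySem.Chars.replace.go [c] [] fuel l acc = acc.reverse ++ l.filter (fun x => !(x == c)) := by
  intro fuel
  induction fuel with
  | zero =>
    intro l acc h
    have : l = [] := List.eq_nil_of_length_eq_zero (Nat.le_zero.mp h)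
    subst this; simp [PySem.Chars.replace.go]
  | succ n ih =>
    intro l acc h
    cases l with
    | nil => rw [PySem.Chars.replace.go]; simp; omega
    | cons x t =>
      have ht : t.length ≤ n := by simp at h; omega
      rw [PySem.Chars.replace.go]
      by_cases hx : (c == x) = true
      · obtain rfl : c = x := beq_iff_eq.mp hx
        have hp : List.isPrefixOf [c] (c :: t) = true := by simp [List.isPrefixOf]
        rw [if_pos hp]
        have hd : List.drop [c].length (c :: t) = t := by simp
        rw [hd]
        simp only [List.reverse_nil, List.nil_append]
        rw [ih t acc ht]
        simp
      · have hp : ¬ (List.isPrefixOf [c] (x :: t) = true) := by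
          simp [List.isPrefixOf, hx]
        rw [if_neg hp]
        rw [ih t (x :: acc) ht]
        have hcx : (x == c) = false := by
          rw [beq_eq_false_iff_ne]
          exact fun e => hx (beq_iff_eq.mpr e.symm)
        simp [hcx]

theorem replace_single (c : Char) (s : String) :
    (PySem.Str.replace s (String.ofList [c]) "").toList = s.toList.filter (fun x => !(x == c)) := by
  rw [PySem.Str.toList_replace]
  rw [PySem.Chars.replace]
  rw [if_neg (by simp)]
  have h1 : (String.ofList [c]).toList = [c] := by simp
  have h2 : ("" : String).toList = [] := by simp
  rw [h1, h2]
  rw [replace_go_single c s.toList.length s.toList [] (le_refl _)]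
  simp

theorem intersperse_cons_cons' {α : Type} (x a b : α) (t : List α) :
    List.intersperse x (a :: b :: t) = a :: x :: List.intersperse x (b :: t) := by
  rw [List.intersperse]; simp

theorem map_intersperse' {α β : Type} (f : α → β) (x : α) :
    ∀ (l : List α), List.map f (List.intersperse x l) = List.intersperse (f x) (List.map f l) := by
  intro l
  induction l with
  | nil => simp
  | cons a t ih =>
    cases t with
    | nil => simp
    | cons b t' =>
      rw [intersperse_cons_cons']
      simp only [List.map_cons]
      rw [intersperse_cons_cons', ← List.map_cons (f := f) (a := b) (l := t'), ih]

-- filtering by p commutes with " ".join when p keeps the separator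
theorem filter_intercalate (p : Char → Bool) (hp : p ' ' = true) (parts : List (List Char)) :
    (List.intercalate [' '] parts).filter p = List.intercalate [' '] (parts.map (List.filter p)) := by
  rw [List.intercalate, List.intercalate, List.filter_flatten, map_intersperse']
  have : List.filter p [' '] = [' '] := by simp [hp]
  rw [this]

-- per token, A's branch-and-replace is exactly the character filter
theorem token_filter (tok : String) :
    (if tok == pvCA then tok
     else PySem.Str.replace (PySem.Str.replace tok "[" "") "]" "").toList
      = tok.toList.filter (fun ch => !(ch == '[' || ch == ']')) := by
  by_cases h : (tok == pvCA) = true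
  · obtain rfl : tok = pvCA := beq_iff_eq.mp h
    rw [if_pos (by simp)]
    decide
  · rw [if_neg (by simpa using h)]
    have e1 : ("[" : String) = String.ofList ['['] := by rfl
    have e2 : ("]" : String) = String.ofList [']'] := by rfl
    rw [e1, e2, replace_single, replace_single, List.filter_filter]
    apply List.filter_congr
    intro c _
    cases hc1 : (c == '[') <;> cases hc2 : (c == ']') <;> simp_all

-- the two normalised texts agree character for character
theorem text_eq (msg : String) :
    PySem.Str.join " " ((PySem.Str.split₀ msg).foldl
      (fun parts tok =>
        if tok == pvCA then parts ++ [tok]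
        else parts ++ [PySem.Str.replace (PySem.Str.replace tok "[" "") "]" ""]) [])
    = String.ofList ((PySem.Str.join " " (PySem.Str.split₀ msg)).toList.filter
        (fun ch => !(ch == '[' || ch == ']'))) := by
  rw [← String.toList_inj]
  have hfold :
      (PySem.Str.split₀ msg).foldl
        (fun parts tok =>
          if tok == pvCA then parts ++ [tok]
          else parts ++ [PySem.Str.replace (PySem.Str.replace tok "[" "") "]" ""]) []
      = (PySem.Str.split₀ msg).map
          (fun tok => if tok == pvCA then tok
            else PySem.Str.replace (PySem.Str.replace tok "[" "") "]" "") := by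
    have : ∀ (l : List String) (acc : List String),
        l.foldl (fun parts tok =>
          if tok == pvCA then parts ++ [tok]
          else parts ++ [PySem.Str.replace (PySem.Str.replace tok "[" "") "]" ""]) acc
        = acc ++ l.map (fun tok => if tok == pvCA then tok
            else PySem.Str.replace (PySem.Str.replace tok "[" "") "]" "") := by
      intro l
      induction l with
      | nil => simp
      | cons a t ih =>
        intro acc
        by_cases h : (a == pvCA) = true <;> simp only [List.foldl_cons, h, if_pos, Bool.false_eq_true, List.map_cons, ih] <;> simp_all
    simpa using this (PySem.Str.split₀ msg) []
  rw [hfold, PySem.Str.toList_join, PySem.Str.toList_join]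
  simp only [String.toList_ofList]
  rw [PySem.Chars.join, PySem.Chars.join]
  have hsep : (" " : String).toList = [' '] := by rfl
  rw [hsep]
  rw [filter_intercalate _ (by decide)]
  congr 1
  rw [List.map_map, List.map_map]
  apply List.map_congr_left
  intro tok _
  exact token_filter tok

-- ===== VERDICT (by name: the statement is the Claim_ definition above) =====
theorem to_twitter_text_spec : Claim_equal_to_twitter_text := by
  intro msg _
  unfold Spec_to_twitter_text to_twitter_text to_twitter_text_alt
  simp only [text_eq msg]
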